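-- pv_equiv track=rewrite | github.com/hdp0545/TIL | 2.Algorithm/pycharm/programmers Study/11번가/1.py | solution
-- ===== SOURCE A (Python) =====
-- def solution(S):
--     # write your code in Python 3.6
--     answer = 0
--     a_num = 0
--     for s in S:
--         if s == 'a':
--             a_num += 1
--             if a_num >= 3:
--                 return -1
--         else:
--             if a_num == 0:
--                 answer += 2
--             elif a_num == 1:
--                 answer += 1
--             a_num = 0
--     if a_num == 0:
--         answer += 2
--     elif a_num == 1:
--         answer += 1
--     return answer
-- ===== SOURCE B (Python) =====
-- def solution(S):
--     if 'aaa' in S: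
--         return -1
--     return 2 * len(S) - 3 * S.count('a') + 2
-- ===== Notes on version B (the rewrite author's own statement) =====
-- stated objective: faster
-- what changed: Replaced the per-character state-machine loop by a closed form: -1 iff a run of three consecutive a-characters occurs (one substring test), else 2*len(S) - 3*(count of the a-character) + 2, since every run boundary contributes 2 minus the preceding run length.
import Mathlib
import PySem

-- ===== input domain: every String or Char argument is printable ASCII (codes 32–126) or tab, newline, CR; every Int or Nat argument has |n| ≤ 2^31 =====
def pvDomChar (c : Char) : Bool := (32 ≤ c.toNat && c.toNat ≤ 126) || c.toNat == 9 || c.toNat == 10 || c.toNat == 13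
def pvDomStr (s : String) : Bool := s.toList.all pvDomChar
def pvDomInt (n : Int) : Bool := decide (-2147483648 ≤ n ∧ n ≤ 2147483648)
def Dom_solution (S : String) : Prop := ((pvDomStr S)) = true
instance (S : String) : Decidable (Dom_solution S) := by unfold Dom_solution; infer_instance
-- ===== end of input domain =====

-- B replaces A's per-character loop by a closed form (one substring test for a triple-a run, len, count); objective: faster (C-level builtins, constant factor).

-- ===== PORT A =====
-- A's for-loop over the characters, carrying (answer, a_num); an early 'return -1' when a run reaches 3.
def solLoopA : List Char → Int → Int → Int
  | [], answer, a_num =>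
      if a_num = 0 then answer + 2 else if a_num = 1 then answer + 1 else answer
  | s :: rest, answer, a_num =>
      if s = 'a' then
        if a_num + 1 ≥ 3 then -1 else solLoopA rest answer (a_num + 1)
      else
        solLoopA rest (if a_num = 0 then answer + 2 else if a_num = 1 then answer + 1 else answer) 0

def solution (S : String) : Int := solLoopA S.toList 0 0

-- ===== PORT B =====
def solution_alt (S : String) : Int :=
  if PySem.Str.isIn "aaa" S then -1
  else 2 * PySem.Str.len S - 3 * (PySem.Str.count S "a" : Int) + 2

-- ===== PRECONDITION & SPEC =====
def Spec_solution (S : String) (out : Int) : Prop := out = solution_alt S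
instance (S : String) (out : Int) : Decidable (Spec_solution S out) := by unfold Spec_solution; infer_instance

-- ===== CLAIM (what is proved, stated in full; the proofs are below) =====
def Claim_equal_solution : Prop := ∀ (S : String), Dom_solution S → Spec_solution S (solution S)

-- ===== LEMMAS AND PROOFS =====

-- run3 k l = true iff, entering l with a current a-run already of length k (k ≤ 2), A's loop hits a run of 3.
def run3 : Nat → List Char → Bool
  | _, [] => false
  | k, c :: cs => if c = 'a' then (decide (2 ≤ k) || run3 (k + 1) cs) else run3 0 cs

theorem run3_cons_a (k : Nat) (cs : List Char) :
    run3 k ('a' :: cs) = (decide (2 ≤ k) || run3 (k + 1) cs) := by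
  simp [run3]

theorem run3_cons_ne {c : Char} (hc : c ≠ 'a') (k : Nat) (cs : List Char) :
    run3 k (c :: cs) = run3 0 cs := by
  simp [run3, hc]

theorem solLoopA_cons_a (cs : List Char) (ans a : Int) :
    solLoopA ('a' :: cs) ans a = if a + 1 ≥ 3 then -1 else solLoopA cs ans (a + 1) := by
  simp [solLoopA]

theorem solLoopA_cons_ne {c : Char} (hc : c ≠ 'a') (cs : List Char) (ans a : Int) :
    solLoopA (c :: cs) ans a =
      solLoopA cs (if a = 0 then ans + 2 else if a = 1 then ans + 1 else ans) 0 := by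
  simp [solLoopA, hc]

theorem run3_iff (l : List Char) : ∀ (k : Nat), k ≤ 2 →
    (run3 k l = true ↔ (List.replicate (3 - k) 'a' <+: l ∨ ['a','a','a'] <:+: l)) := by
  induction l with
  | nil =>
    intro k hk
    have h1 : ¬ (List.replicate (3 - k) 'a' <+: ([] : List Char)) := by
      intro h
      have := List.eq_nil_of_prefix_nil h
      have := congrArg List.length this
      simp at this
      omega
    have h2 : ¬ (['a','a','a'] <:+: ([] : List Char)) := by
      intro h
      have := h.sublist.length_le
      simp at this
    simp [run3, h1, h2]
  | cons c cs ih =>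
    intro k hk
    by_cases hc : c = 'a'
    · subst hc
      rw [run3_cons_a]
      by_cases hk2 : k = 2
      · subst hk2
        simp only [show decide (2 ≤ 2) = true from rfl, Bool.true_or]
        constructor
        · intro _
          left
          show List.replicate 1 'a' <+: 'a' :: cs
          simp
        · intro _; trivial
      · have hrep : List.replicate (3 - k) 'a' = 'a' :: List.replicate (2 - k) 'a' := by
          have h3 : 3 - k = (2 - k) + 1 := by omega
          rw [h3, List.replicate_succ]
        have ih1 := ih (k + 1) (by omega)
        have h21 : (3 : Nat) - (k + 1) = 2 - k := by omega
        rw [h21] at ih1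
        have h2k : decide (2 ≤ k) = false := by simp; omega
        rw [h2k, Bool.false_or, ih1, hrep]
        constructor
        · rintro (h | h)
          · left; exact List.cons_prefix_cons.mpr ⟨rfl, h⟩
          · right; exact h.trans (List.suffix_cons 'a' cs).isInfix
        · rintro (h | h)
          · left; exact (List.cons_prefix_cons.mp h).2
          · rcases List.infix_cons_iff.mp h with hp | hi
            · have h2 : List.replicate 2 'a' <+: cs := (List.cons_prefix_cons.mp hp).2
              left
              refine List.IsPrefix.trans ⟨List.replicate k 'a', ?_⟩ h2
              rw [← List.replicate_add]
              congr 1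
              omega
            · right; exact hi
    · have ih0 := ih 0 (by omega)
      rw [run3_cons_ne hc, ih0]
      have hhead : ∀ m : Nat, 1 ≤ m → ¬ (List.replicate m 'a' <+: c :: cs) := by
        intro m hm h
        have hm' : List.replicate m 'a' = 'a' :: List.replicate (m - 1) 'a' := by
          have h3 : m = (m - 1) + 1 := by omega
          rw [h3, List.replicate_succ]
          simp
        rw [hm'] at h
        exact hc (List.cons_prefix_cons.mp h).1.symm
      constructor
      · rintro (h | h)
        · right
          have : List.replicate (3 - 0) 'a' = ['a','a','a'] := rfl
          rw [this] at h
          exact List.infix_cons_iff.mpr (Or.inr h.isInfix)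
        · right
          exact List.infix_cons_iff.mpr (Or.inr h)
      · rintro (h | h)
        · exact absurd h (hhead _ (by omega))
        · rcases List.infix_cons_iff.mp h with hp | hi
          · exact absurd hp (hhead 3 (by omega))
          · right; exact hi

theorem run3_zero (l : List Char) :
    run3 0 l = PySem.Chars.isIn ['a','a','a'] l := by
  by_cases h : PySem.Chars.isIn ['a','a','a'] l = true
  · rw [h]
    exact (run3_iff l 0 (by omega)).mpr (Or.inr ((PySem.Chars.isIn_iff_infix _ _).mp h))
  · have hb : PySem.Chars.isIn ['a','a','a'] l = false := by
      revert h; cases PySem.Chars.isIn ['a','a','a'] l <;> simp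
    have h' := (PySem.Chars.isIn_eq_false_iff _ _).mp hb
    have hr : run3 0 l ≠ true := by
      intro hr
      rcases (run3_iff l 0 (by omega)).mp hr with hp | hi
      · exact h' (by simpa using hp.isInfix)
      · exact h' hi
    rw [hb]
    revert hr; cases run3 0 l <;> simp

-- A's loop in closed form: -1 iff a run of 3 is hit, else the boundary sum.
theorem solLoopA_closed (l : List Char) : ∀ (ans : Int) (k : Nat), k ≤ 2 →
    solLoopA l ans (k : Int) =
      if run3 k l then -1
      else ans + 2 * (l.length : Int) - 3 * (l.count 'a' : Int) + 2 - k := by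
  induction l with
  | nil =>
    intro ans k hk
    simp only [run3, Bool.false_eq_true, if_false, solLoopA]
    interval_cases k <;> norm_num <;> omega
  | cons c cs ih =>
    intro ans k hk
    by_cases hc : c = 'a'
    · subst hc
      rw [solLoopA_cons_a, run3_cons_a]
      by_cases hk2 : k = 2
      · subst hk2
        norm_num
      · have hge : ¬ ((k : Int) + 1 ≥ 3) := by omega
        rw [if_neg hge]
        have hcast : (k : Int) + 1 = ((k + 1 : Nat) : Int) := by push_cast; ring
        rw [hcast, ih ans (k + 1) (by omega)]
        have h2k : decide (2 ≤ k) = false := by simp; omega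
        rw [h2k, Bool.false_or]
        split_ifs with h
        · rfl
        · simp only [List.length_cons, List.count_cons_self]
          push_cast
          ring
    · rw [solLoopA_cons_ne hc]
      have h0 : (0 : Int) = ((0 : Nat) : Int) := rfl
      rw [h0, ih _ 0 (by omega), run3_cons_ne hc]
      have hcnt : (c :: cs).count 'a' = cs.count 'a' := by
        simp [hc]
      split_ifs with h hk0 hk1
      · rfl
      · -- k = 0
        have hkk : k = 0 := by exact_mod_cast hk0
        subst hkk
        rw [hcnt]
        simp only [List.length_cons]
        push_cast
        ring
      · -- k = 1
        have hkk : k = 1 := by exact_mod_cast hk1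
        subst hkk
        rw [hcnt]
        simp only [List.length_cons]
        push_cast
        ring
      · -- k = 2
        have hkk : k = 2 := by
          interval_cases k
          · exact absurd rfl (by exact_mod_cast hk0)
          · exact absurd rfl (by exact_mod_cast hk1)
          · rfl
        subst hkk
        rw [hcnt]
        simp only [List.length_cons]
        push_cast
        ring

-- Python str.count with a single-character needle is the character count.
theorem countGo_single (fuel : Nat) : ∀ (l : List Char) (acc : Nat), l.length ≤ fuel →
    PySem.Chars.count.go ['a'] fuel l acc = acc + l.count 'a' := by
  induction fuel with
  | zero =>
    intro l acc h
    have hl : l = [] := by cases l <;> simp_all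
    subst hl
    simp [PySem.Chars.count.go]
  | succ n ih =>
    intro l acc h
    cases l with
    | nil => simp [PySem.Chars.count.go]
    | cons c cs =>
      simp only [PySem.Chars.count.go]
      by_cases hc : c = 'a'
      · subst hc
        have hpre : List.isPrefixOf ['a'] ('a' :: cs) = true := by
          simp [List.isPrefixOf]
        rw [if_pos hpre]
        simp only [List.length_cons, List.drop_succ_cons, List.length_nil, List.drop_zero]
        rw [ih cs (acc + 1) (by simp at h; omega)]
        simp
        omega
      · have hpre : ¬ (List.isPrefixOf ['a'] (c :: cs) = true) := by
          simp [List.isPrefixOf]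
          exact fun hh => hc hh.symm
        rw [if_neg hpre]
        rw [ih cs acc (by simp at h; omega)]
        simp [hc]

theorem count_single (l : List Char) : PySem.Chars.count l ['a'] = l.count 'a' := by
  rw [PySem.Chars.count]
  simp only [List.isEmpty_cons, Bool.false_eq_true, if_false]
  simpa using countGo_single l.length l 0 le_rfl

-- ===== VERDICT (by name: the statement is the Claim_ definition above) =====
theorem solution_spec : Claim_equal_solution := by
  intro S _
  unfold Spec_solution solution solution_alt
  have h0 : (0 : Int) = ((0 : Nat) : Int) := rfl
  conv_lhs => rw [show solLoopA S.toList 0 0 = solLoopA S.toList 0 ((0 : Nat) : Int) from rfl]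
  rw [solLoopA_closed S.toList 0 0 (by omega)]
  have hisin : PySem.Str.isIn "aaa" S = PySem.Chars.isIn ['a','a','a'] S.toList := by
    rw [PySem.Str.isIn_eq]; rfl
  have hcount : (PySem.Str.count S "a" : Int) = (S.toList.count 'a' : Int) := by
    rw [PySem.Str.count_eq]
    norm_cast
    exact count_single S.toList
  rw [hisin, hcount, PySem.Str.len_eq S, ← run3_zero]
  split_ifs with h
  · rfl
  · push_cast
    ring
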